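-- pv_equiv track=rewrite | github.com/EthanHoldn/hilberts-curve | Hilbert_Curve.py | toImage
-- ===== SOURCE A (Python) =====
-- def toImage(steps,d):
--
--     #calculates the dimension of the image and creates the corresponding array of pixels
--     size = 2**(d+2)-1
--     image = [[0 for _ in range(size)] for _ in range(size)]
--
--     #initial point
--     point = [0,0]
--
--     #calculates where each point is and draws a line
--     #the pixel color can be changed to a gradient by replacing 255 with n%255
--     for n in range(len(steps)):
--         d = steps[n]
--
--         #draws a in pixel at the current location of the point
--         image[-1*(point[0]+1)][point[1]] = 255 #n%255
--
--         #draws a pixel in between the current point and the next point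
--         if d == "u":
--             image[-1*(point[0]+2)][point[1]] = 255 #n%255
--             point = [point[0]+2,point[1]]
--         elif d == "d":
--             image[-1*(point[0])][point[1]] = 255 #n%255
--             point = [point[0]-2,point[1]]
--         elif d == "l":
--             image[-1*(point[0]+1)][point[1]-1] = 255 #n%255
--             point = [point[0],point[1]-2]
--         elif d == "r":
--             image[-1*(point[0]+1)][point[1]+1] = 255 #n%255
--             point = [point[0],point[1]+2]
--
--     #image[-1*(point[0]+1)][point[1]] = 255
--     return(image)
-- ===== SOURCE B (Python) =====
-- def toImage(steps, d):
--     size = 2**(d+2)-1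
--     image = [[0]*size for _ in range(size)]
--     HALF = {"u": (1, 0), "d": (-1, 0), "l": (0, -1), "r": (0, 1)}
--     # phase 1: prefix-scan the trajectory (positions[i] = point before step i)
--     positions = [(0, 0)]
--     for s in steps:
--         hr, hc = HALF.get(s, (0, 0))
--         r, c = positions[-1]
--         positions.append((r + 2 * hr, c + 2 * hc))
--     # phase 2: rasterize; the final position's pixel is never drawn
--     for s, (r, c) in zip(steps, positions):
--         image[-1 * (r + 1)][c] = 255
--         hr, hc = HALF.get(s, (0, 0))
--         if (hr, hc) != (0, 0):
--             image[-1 * (r + hr + 1)][c + hc] = 255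
--     return image
-- ===== Notes on version B (the rewrite author's own statement) =====
-- stated objective: alternative
-- what changed: B splits A's fused simulate-and-draw loop into two phases: a prefix-scan that builds the whole trajectory from a half-delta table, then a rasterization pass over (step, position) pairs that paints the current pixel and the midpoint pixel with one shared put-pixel index formula instead of A's four per-direction index expressions and in-loop point mutation.
import Mathlib
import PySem

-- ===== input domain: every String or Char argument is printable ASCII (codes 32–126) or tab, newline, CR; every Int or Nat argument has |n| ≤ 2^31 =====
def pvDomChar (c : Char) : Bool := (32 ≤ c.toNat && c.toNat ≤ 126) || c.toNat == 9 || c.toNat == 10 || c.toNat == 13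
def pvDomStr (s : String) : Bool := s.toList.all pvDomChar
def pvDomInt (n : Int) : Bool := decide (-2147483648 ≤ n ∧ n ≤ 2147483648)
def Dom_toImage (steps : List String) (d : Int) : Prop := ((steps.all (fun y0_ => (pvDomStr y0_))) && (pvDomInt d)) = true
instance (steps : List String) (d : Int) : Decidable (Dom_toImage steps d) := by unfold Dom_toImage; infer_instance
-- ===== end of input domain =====

-- B rewrites A's fused simulate-and-draw loop as two phases (prefix-scan of the trajectory, then a
-- rasterization pass using one put-pixel formula and a half-delta table); objective: alternative decomposition.

-- shared primitive: Python's 'image[i][j] = v' (total form; Pre_ keeps both indices in range, where Python does not raise)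
def pvSet2 (img : List (List Int)) (i j v : Int) : List (List Int) :=
  PySem.List.pySetD img i (PySem.List.pySetD (PySem.List.pyGetD img i []) j v)

-- ===== PORT A =====
-- loop body of A: draw current pixel, then per-direction intermediate pixel and point update (fused state)
def pvStepA (st : List (List Int) × Int × Int) (s : String) : List (List Int) × Int × Int :=
  let img1 := pvSet2 st.1 (-(st.2.1 + 1)) st.2.2 255
  if s = "u" then (pvSet2 img1 (-(st.2.1 + 2)) st.2.2 255, st.2.1 + 2, st.2.2)
  else if s = "d" then (pvSet2 img1 (-(st.2.1)) st.2.2 255, st.2.1 - 2, st.2.2)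
  else if s = "l" then (pvSet2 img1 (-(st.2.1 + 1)) (st.2.2 - 1) 255, st.2.1, st.2.2 - 2)
  else if s = "r" then (pvSet2 img1 (-(st.2.1 + 1)) (st.2.2 + 1) 255, st.2.1, st.2.2 + 2)
  else (img1, st.2)

def toImage (steps : List String) (d : Int) : List (List Int) :=
  let size := (2 : Int) ^ ((d + 2).toNat) - 1
  let image := List.replicate size.toNat (List.replicate size.toNat 0)
  (steps.foldl pvStepA (image, 0, 0)).1

-- ===== PORT B =====
-- HALF.get(s, (0,0)): half-delta table of the four directions
def pvHalf (s : String) : Int × Int :=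
  if s = "u" then (1, 0) else if s = "d" then (-1, 0)
  else if s = "l" then (0, -1) else if s = "r" then (0, 1) else (0, 0)

-- phase 1: prefix-scan of the trajectory (positions[i] = point before step i, plus the final point)
def pvPositionsFrom (p : Int × Int) : List String → List (Int × Int)
  | [] => [p]
  | s :: rest => p :: pvPositionsFrom (p.1 + 2 * (pvHalf s).1, p.2 + 2 * (pvHalf s).2) rest

def pvPutPixel (img : List (List Int)) (p : Int × Int) : List (List Int) :=
  pvSet2 img (-(p.1 + 1)) p.2 255

-- phase 2 body: paint the pixel at p, then the midpoint pixel at p + half-delta (if s is a direction)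
def pvPaint (img : List (List Int)) (sp : String × Int × Int) : List (List Int) :=
  let img1 := pvPutPixel img sp.2
  let h := pvHalf sp.1
  if h = (0, 0) then img1 else pvPutPixel img1 (sp.2.1 + h.1, sp.2.2 + h.2)

def toImage_alt (steps : List String) (d : Int) : List (List Int) :=
  let size := (2 : Int) ^ ((d + 2).toNat) - 1
  let image := List.replicate size.toNat (List.replicate size.toNat 0)
  (steps.zip (pvPositionsFrom (0, 0) steps)).foldl pvPaint image

-- ===== PRECONDITION & SPEC =====
-- is Int index i valid (possibly negative, Python wrap) for a list of length `size`?
def pvInIdx (size i : Int) : Bool := decide (-size ≤ i) && decide (i < size)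

-- all indices written during the iteration with step s at point p are in range
def pvOkB (size : Int) (sp : String × Int × Int) : Bool :=
  pvInIdx size (-(sp.2.1 + 1)) && pvInIdx size sp.2.2 &&
    (pvHalf sp.1 == (0, 0) ||
      (pvInIdx size (-(sp.2.1 + (pvHalf sp.1).1 + 1)) && pvInIdx size (sp.2.2 + (pvHalf sp.1).2)))

-- point before step i, in closed form: row = 2·(#"u" − #"d"), col = 2·(#"r" − #"l") among the first i steps
def pvRowAt (steps : List String) (i : Nat) : Int :=
  2 * (((steps.take i).count "u" : Int) - ((steps.take i).count "d" : Int))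
def pvColAt (steps : List String) (i : Nat) : Int :=
  2 * (((steps.take i).count "r" : Int) - ((steps.take i).count "l" : Int))

-- Pre_ = exactly the inputs on which Python A returns: d+2 ≥ 0 (2**(d+2) is an int), d ≤ 13
-- (for d ≥ 14 CPython raises MemoryError allocating the (2^(d+2)-1)-square image), and every
-- pixel index written along the walk is in range (no IndexError; negative in-range indices wrap).
def Pre_toImage (steps : List String) (d : Int) : Prop :=
  -2 ≤ d ∧ d ≤ 13 ∧
    steps.zipIdx.all
      (fun si => pvOkB ((2 : Int) ^ ((d + 2).toNat) - 1)
        (si.1, pvRowAt steps si.2, pvColAt steps si.2)) = true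
instance (steps : List String) (d : Int) : Decidable (Pre_toImage steps d) := by
  unfold Pre_toImage; infer_instance

def pvWitness_toImage : List String × Int := (["r", "u", "l"], 0)

def Spec_toImage (steps : List String) (d : Int) (out : List (List Int)) : Prop := out = toImage_alt steps d
instance (steps : List String) (d : Int) (out : List (List Int)) : Decidable (Spec_toImage steps d out) := by unfold Spec_toImage; infer_instance

-- ===== CLAIM (what is proved, stated in full; the proofs are below) =====
def Claim_equal_toImage : Prop := ∀ (steps : List String) (d : Int), Dom_toImage steps d → Pre_toImage steps d → Spec_toImage steps d (toImage steps d)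

-- ===== LEMMAS AND PROOFS =====

-- one step of A = paint at the current position + move by twice the half-delta
theorem pvStepA_eq_paint (st : List (List Int) × Int × Int) (s : String) :
    pvStepA st s =
      (pvPaint st.1 (s, st.2), st.2.1 + 2 * (pvHalf s).1, st.2.2 + 2 * (pvHalf s).2) := by
  unfold pvStepA pvPaint pvPutPixel pvHalf
  by_cases hu : s = "u" <;> by_cases hd : s = "d" <;> by_cases hl : s = "l" <;>
    by_cases hr : s = "r" <;> simp_all <;> (try constructor) <;> ring_nf

-- the fused loop of A equals the rasterization pass of B over the trajectory
theorem pvFold_eq (steps : List String) (img : List (List Int)) (p : Int × Int) :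
    (steps.foldl pvStepA (img, p)).1 =
      (steps.zip (pvPositionsFrom p steps)).foldl pvPaint img := by
  induction steps generalizing img p with
  | nil => rfl
  | cons s rest ih =>
      simp only [pvPositionsFrom, List.zip_cons_cons, List.foldl_cons, pvStepA_eq_paint]
      exact ih _ _

-- ===== VERDICT (by name: the statement is the Claim_ definition above) =====
theorem toImage_spec : Claim_equal_toImage := by
  intro steps d _ _
  unfold Spec_toImage toImage toImage_alt
  exact pvFold_eq steps _ (0, 0)
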